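-- pv_equiv track=rewrite | github.com/EslamKamel89/leetcode_sandbox | course/section_2_two_pointers/code/lesson_22_some_of_squares_of_numbers.py | judgeSquareSum1
-- ===== SOURCE A (Python) =====
-- def judgeSquareSum1(c: int) -> bool:
--     if c == 0:
--         return True
--     for i in range(c + 1):
--         for j in range(c + 1):
--             if (i**2) + (j**2) == c:
--                 return True
--     return False
-- ===== SOURCE B (Python) =====
-- def judgeSquareSum1(c: int) -> bool:
--     if c < 0:
--         return False
--     b = 0
--     while (b + 1) * (b + 1) <= c:
--         b += 1
--     a = 0
--     while a <= b:
--         s = a * a + b * b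
--         if s == c:
--             return True
--         if s < c:
--             a += 1
--         else:
--             b -= 1
--     return False
-- ===== Notes on version B (the rewrite author's own statement) =====
-- stated objective: faster
-- what changed: Replaced the O(c^2) exhaustive double scan of all pairs 0..c with an integer-sqrt computation followed by the classic two-pointer sweep a=0..b=isqrt(c), O(sqrt c) total.
import Mathlib
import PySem

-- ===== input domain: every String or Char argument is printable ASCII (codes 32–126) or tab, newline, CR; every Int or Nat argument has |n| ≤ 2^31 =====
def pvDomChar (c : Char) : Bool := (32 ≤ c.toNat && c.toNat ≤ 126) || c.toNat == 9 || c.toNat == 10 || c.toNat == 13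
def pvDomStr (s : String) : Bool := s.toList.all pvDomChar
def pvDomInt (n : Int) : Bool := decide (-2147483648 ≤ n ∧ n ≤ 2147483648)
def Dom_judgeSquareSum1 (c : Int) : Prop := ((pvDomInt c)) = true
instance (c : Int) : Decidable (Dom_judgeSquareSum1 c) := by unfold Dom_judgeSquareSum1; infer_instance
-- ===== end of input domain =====

-- B replaces A's double scan over all pairs in 0..c with an integer square root
-- plus the two-pointer sweep over 0..isqrt(c); equality of return values is proved below.

-- ===== PORT A =====
-- early 'return True' inside the nested for-loops = List.any over the two ranges
def judgeSquareSum1 (c : Int) : Bool :=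
  if c == 0 then true
  else
    ((PySem.List.pyRange 0 (c+1) 1).any (fun i =>
      (PySem.List.pyRange 0 (c+1) 1).any (fun j =>
        i^2 + j^2 == c)))

-- ===== PORT B =====
-- 'while (b+1)*(b+1) <= c: b += 1' (b starts at 0 and stays nonnegative, tracked as Nat;
-- the Nat fuel only makes the loop total: c.toNat steps always suffice)
def pvIsqrtLoop (c : Int) : Nat → Nat → Nat
  | 0, b => b
  | f + 1, b =>
    if ((b : Int) + 1) * ((b : Int) + 1) ≤ c then pvIsqrtLoop c f (b + 1) else b

-- the two-pointer 'while a <= b' loop (fuel only makes it total: b - a + 1 steps suffice)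
def pvSweep (c : Int) : Nat → Int → Int → Bool
  | 0, _, _ => false
  | f + 1, a, b =>
    if a ≤ b then
      let s := a * a + b * b
      if s == c then true
      else if s < c then pvSweep c f (a + 1) b
      else pvSweep c f a (b - 1)
    else false

def judgeSquareSum1_alt (c : Int) : Bool :=
  if c < 0 then false
  else
    let r := pvIsqrtLoop c c.toNat 0
    pvSweep c (r + 1) 0 (r : Int)

-- ===== PRECONDITION & SPEC =====
def Spec_judgeSquareSum1 (c : Int) (out : Bool) : Prop := out = judgeSquareSum1_alt c
instance (c : Int) (out : Bool) : Decidable (Spec_judgeSquareSum1 c out) := by unfold Spec_judgeSquareSum1; infer_instance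

-- ===== CLAIM (what is proved, stated in full; the proofs are below) =====
def Claim_equal_judgeSquareSum1 : Prop := ∀ (c : Int), Dom_judgeSquareSum1 c → Spec_judgeSquareSum1 c (judgeSquareSum1 c)

-- ===== LEMMAS AND PROOFS =====

-- the incremental sqrt loop: from the invariant b*b ≤ c, with enough fuel left,
-- it returns r with r*r ≤ c < (r+1)^2
lemma pvIsqrtLoop_bounds (c : Int) :
    ∀ (f b : Nat), (b : Int) * (b : Int) ≤ c → c.toNat ≤ b + f →
    ((pvIsqrtLoop c f b : Nat) : Int) * ((pvIsqrtLoop c f b : Nat) : Int) ≤ c ∧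
    c < ((pvIsqrtLoop c f b : Nat) : Int) * ((pvIsqrtLoop c f b : Nat) : Int)
      + 2 * ((pvIsqrtLoop c f b : Nat) : Int) + 1 := by
  intro f
  induction f with
  | zero =>
    intro b hb hf
    have hc0 : (0 : Int) ≤ c := le_trans (mul_self_nonneg _) hb
    have hcb : c ≤ (b : Int) := by omega
    refine ⟨hb, ?_⟩
    simp only [pvIsqrtLoop]
    nlinarith [mul_self_nonneg ((b : Int))]
  | succ f ih =>
    intro b hb hf
    rw [pvIsqrtLoop]
    split_ifs with h
    · exact ih (b + 1) (by push_cast; nlinarith) (by omega)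
    · exact ⟨hb, by nlinarith [not_le.mp h]⟩

-- the two-pointer sweep returns true iff an ordered pair a ≤ x ≤ y ≤ b with x² + y² = c exists
lemma pvSweep_iff (c : Int) :
    ∀ (f : Nat) (a b : Int), 0 ≤ a → b - a + 1 ≤ (f : Int) →
    (pvSweep c f a b = true ↔ ∃ x y : Int, a ≤ x ∧ x ≤ y ∧ y ≤ b ∧ x * x + y * y = c) := by
  intro f
  induction f with
  | zero =>
    intro a b ha hf
    simp only [pvSweep]
    constructor
    · intro hft
      exact absurd hft (by simp)
    · rintro ⟨x, y, hx, hxy, hyb, _⟩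
      omega
  | succ f ih =>
    intro a b ha hf
    rw [pvSweep]
    by_cases hab : a ≤ b
    · rw [if_pos hab]
      by_cases hs : a * a + b * b = c
      · rw [if_pos (beq_iff_eq.mpr hs)]
        simp only [true_iff]
        exact ⟨a, b, le_refl a, hab, le_refl b, hs⟩
      · rw [if_neg (by simpa using hs)]
        by_cases hlt : a * a + b * b < c
        · rw [if_pos hlt, ih (a + 1) b (by omega) (by push_cast at hf ⊢; omega)]
          constructor
          · rintro ⟨x, y, hx, hxy, hyb, heq⟩
            exact ⟨x, y, by omega, hxy, hyb, heq⟩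
          · rintro ⟨x, y, hx, hxy, hyb, heq⟩
            refine ⟨x, y, ?_, hxy, hyb, heq⟩
            by_contra hxa
            have hxa' : x = a := by omega
            subst hxa'
            have hy0 : 0 ≤ y := le_trans ha hxy
            nlinarith
        · rw [if_neg hlt, ih a (b - 1) ha (by push_cast at hf ⊢; omega)]
          have hgt : c < a * a + b * b := by
            rcases lt_or_eq_of_le (not_lt.mp hlt) with h' | h'
            · exact h'
            · exact absurd h'.symm hs
          constructor
          · rintro ⟨x, y, hx, hxy, hyb, heq⟩
            exact ⟨x, y, hx, hxy, by omega, heq⟩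
          · rintro ⟨x, y, hx, hxy, hyb, heq⟩
            refine ⟨x, y, hx, hxy, ?_, heq⟩
            by_contra hyb'
            have hyb'' : y = b := by omega
            subst hyb''
            nlinarith
    · rw [if_neg hab]
      constructor
      · intro hft
        exact absurd hft (by simp)
      · rintro ⟨x, y, hx, hxy, hyb, _⟩
        omega

-- A's nested any over range(c+1) = the unordered existence statement
lemma judgeSquareSum1_iff (c : Int) (hc : 0 ≤ c) :
    judgeSquareSum1 c = true ↔
      ∃ x y : Int, 0 ≤ x ∧ x ≤ c ∧ 0 ≤ y ∧ y ≤ c ∧ x * x + y * y = c := by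
  unfold judgeSquareSum1
  by_cases h0 : c = 0
  · subst h0
    rw [if_pos (by decide)]
    simp only [true_iff]
    exact ⟨0, 0, by norm_num⟩
  · rw [if_neg (by simpa using h0)]
    simp only [List.any_eq_true, PySem.List.mem_pyRange_one, beq_iff_eq]
    constructor
    · rintro ⟨x, ⟨hx0, hx1⟩, y, ⟨hy0, hy1⟩, heq⟩
      exact ⟨x, y, hx0, by omega, hy0, by omega, by nlinarith [sq x, sq y]⟩
    · rintro ⟨x, y, hx0, hx1, hy0, hy1, heq⟩
      exact ⟨x, ⟨hx0, by omega⟩, y, ⟨hy0, by omega⟩, by nlinarith [sq x, sq y]⟩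

-- ===== VERDICT (by name: the statement is the Claim_ definition above) =====
theorem judgeSquareSum1_spec : Claim_equal_judgeSquareSum1 := by
  intro c _
  unfold Spec_judgeSquareSum1
  by_cases hc : c < 0
  · -- both sides are false: A's range(c+1) is empty, B returns early
    unfold judgeSquareSum1 judgeSquareSum1_alt
    rw [if_neg (by simp; omega), if_pos hc]
    rw [PySem.List.pyRange_one_eq_nil (by omega)]
    simp
  · rw [not_lt] at hc
    unfold judgeSquareSum1_alt
    rw [if_neg (by omega)]
    set r : Int := ((pvIsqrtLoop c c.toNat 0 : Nat) : Int) with hr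
    have hr0 : 0 ≤ r := by positivity
    obtain ⟨hr1, hr2⟩ := pvIsqrtLoop_bounds c c.toNat 0 (by simpa using hc) (by omega)
    rw [← hr] at hr1 hr2
    rw [Bool.eq_iff_iff, judgeSquareSum1_iff c hc,
        pvSweep_iff c (pvIsqrtLoop c c.toNat 0 + 1) 0 r (le_refl 0) (by push_cast [hr]; omega)]
    have hrc : r ≤ c := by
      rcases eq_or_lt_of_le hr0 with h | h
      · omega
      · nlinarith
    constructor
    · rintro ⟨x, y, hx0, hx1, hy0, hy1, heq⟩
      rcases le_total x y with hxy | hxy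
      · refine ⟨x, y, hx0, hxy, ?_, heq⟩
        by_contra hyr
        have : r + 1 ≤ y := by omega
        nlinarith
      · refine ⟨y, x, hy0, hxy, ?_, by omega⟩
        by_contra hyr
        have : r + 1 ≤ x := by omega
        nlinarith
    · rintro ⟨x, y, hx, hxy, hyr, heq⟩
      exact ⟨x, y, hx, by omega, by omega, by omega, heq⟩
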